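-- pv_equiv track=rewrite | github.com/darshann25/Data-Visualization-and-Analytics | HW1-dpatel96/verify_hw1.py | find_in_ziplist
-- ===== SOURCE A (Python) =====
-- def find_in_ziplist(entry, ziplist):
--     other_locations = list()
--     for alternate in entry:
--         alt_basename = alternate.split('/')[-1]
--         for zipfile in ziplist:
--             if zipfile == alternate:
--                 return True, None
--
--             zip_basename = zipfile.split('/')[-1]
--             if zip_basename == alt_basename:
--                 other_locations.append(zipfile)
--
--     return False, other_locations
-- ===== SOURCE B (Python) =====
-- def find_in_ziplist(entry, ziplist):
--     zipset = set(ziplist)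
--     if not zipset.isdisjoint(entry):
--         return True, None
--     bases = {}
--     for z in ziplist:
--         bases.setdefault(z.split('/')[-1], []).append(z)
--     return False, [z for a in entry for z in bases.get(a.split('/')[-1], [])]
-- ===== Notes on version B (the rewrite author's own statement) =====
-- stated objective: alternative
-- what changed: B has no per-entry scan or early-return loop at all: it decides the boolean up front by a set-disjointness test between entry and ziplist, and only in the False case groups ziplist by basename into a dict and emits the result as one flat comprehension over entry.
import Mathlib
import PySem

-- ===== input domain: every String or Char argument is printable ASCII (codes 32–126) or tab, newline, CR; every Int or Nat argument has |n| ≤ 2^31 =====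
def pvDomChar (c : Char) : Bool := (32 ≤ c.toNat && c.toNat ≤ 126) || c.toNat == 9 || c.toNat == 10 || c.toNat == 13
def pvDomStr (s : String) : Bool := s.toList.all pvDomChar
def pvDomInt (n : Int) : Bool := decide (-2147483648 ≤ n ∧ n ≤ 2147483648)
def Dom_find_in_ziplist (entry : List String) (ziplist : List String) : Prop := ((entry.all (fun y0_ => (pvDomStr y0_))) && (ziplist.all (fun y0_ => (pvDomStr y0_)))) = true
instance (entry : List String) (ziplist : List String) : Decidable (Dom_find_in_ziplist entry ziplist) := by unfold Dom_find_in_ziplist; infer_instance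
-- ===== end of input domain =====

-- B removes A's nested early-return loops entirely: it decides the boolean up front by a
-- set-disjointness test, then builds the False-case list as one flat pass over a basename-grouped
-- dict (objective: alternative).


-- ===== PORT A =====
-- s.split('/')[-1]; the separator "/" is nonempty so split? is always `some`, and the
-- resulting list is always nonempty so the [-1] index never raises (defaults never used).
def pvBase (s : String) : String :=
  PySem.List.pyGetD ((PySem.Str.split? s "/").getD []) (-1) ""

-- inner `for zipfile in ziplist` loop; `none` encodes the early `return True, None`
def pvLoopZ (alt altb : String) : List String → List String → Option (List String)
  | [], acc => some acc
  | z :: rest, acc =>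
    if z = alt then none
    else pvLoopZ alt altb rest (if pvBase z = altb then acc ++ [z] else acc)

-- outer `for alternate in entry` loop carrying other_locations
def pvLoopA : List String → List String → List String → Bool × Option (List String)
  | [], _, acc => (false, some acc)
  | a :: rest, zl, acc =>
    match pvLoopZ a (pvBase a) zl acc with
    | none => (true, none)
    | some acc' => pvLoopA rest zl acc'

def find_in_ziplist (entry : List String) (ziplist : List String) : Bool × Option (List String) :=
  pvLoopA entry ziplist []

-- ===== PORT B =====
-- stage 1: set-disjointness decides the boolean; stage 2 (False case only): group ziplist
-- by basename, then one flat comprehension over entry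
def find_in_ziplist_alt (entry : List String) (ziplist : List String) : Bool × Option (List String) :=
  let zipset := PySem.Set.ofList ziplist
  if ¬ (PySem.Set.isdisjoint zipset entry = true) then (true, none)
  else
    let bases := ziplist.foldl (fun d z => d.modify (pvBase z) [] (· ++ [z])) PySem.Dict.empty
    (false, some (entry.flatMap (fun a => bases.getD (pvBase a) [])))

-- ===== PRECONDITION & SPEC =====
def Spec_find_in_ziplist (entry : List String) (ziplist : List String) (out : Bool × Option (List String)) : Prop := out = find_in_ziplist_alt entry ziplist
instance (entry : List String) (ziplist : List String) (out : Bool × Option (List String)) : Decidable (Spec_find_in_ziplist entry ziplist out) := by unfold Spec_find_in_ziplist; infer_instance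

-- ===== CLAIM =====
def Claim_equal_find_in_ziplist : Prop := ∀ (entry : List String) (ziplist : List String), Dom_find_in_ziplist entry ziplist → Spec_find_in_ziplist entry ziplist (find_in_ziplist entry ziplist)

-- ===== LEMMAS AND PROOFS =====

-- A's inner scan: early-returns iff alt occurs, otherwise appends the basename matches in order
theorem pvLoopZ_eq (alt altb : String) (zl : List String) (acc : List String) :
    pvLoopZ alt altb zl acc =
      if alt ∈ zl then none else some (acc ++ zl.filter (fun z => pvBase z = altb)) := by
  induction zl generalizing acc with
  | nil => simp [pvLoopZ]
  | cons z rest ih =>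
    by_cases hz : z = alt
    · simp [pvLoopZ, hz]
    · rw [pvLoopZ, if_neg hz, ih]
      by_cases hm : alt ∈ rest
      · simp [hm]
      · have : ¬ alt ∈ z :: rest := by
          simp only [List.mem_cons, not_or]
          exact ⟨fun h => hz h.symm, hm⟩
        simp only [if_neg hm, if_neg this, List.filter_cons]
        split_ifs with hb <;> simp_all

-- A's whole computation: (True, None) iff some alternate occurs in ziplist,
-- otherwise the accumulator extended with per-alternate basename matches
theorem pvLoopA_char (entry zl acc : List String) :
    pvLoopA entry zl acc =
      if entry.any (fun a => decide (a ∈ zl)) then (true, none)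
      else (false, some (acc ++ entry.flatMap (fun a => zl.filter (fun z => pvBase z = pvBase a)))) := by
  induction entry generalizing acc with
  | nil => simp [pvLoopA]
  | cons a rest ih =>
    rw [pvLoopA, pvLoopZ_eq]
    by_cases ha : a ∈ zl
    · simp [ha]
    · rw [if_neg ha]
      simp only [ih, List.any_cons, ha, decide_false, Bool.false_or,
        List.flatMap_cons, List.append_assoc]

-- B's dict after the build loop: lookup at c yields the ziplist elements whose basename is c, in order
theorem pvDict_getD (zl : List String) (d : PySem.Dict String (List String)) (c : String) :
    (zl.foldl (fun d z => d.modify (pvBase z) [] (· ++ [z])) d).getD c [] =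
      d.getD c [] ++ zl.filter (fun z => pvBase z = c) := by
  induction zl generalizing d with
  | nil => simp
  | cons z rest ih =>
    rw [List.foldl_cons, ih, PySem.Dict.getD_modify, List.filter_cons]
    by_cases hc : c = pvBase z
    · simp [hc]
    · simp only [if_neg hc, decide_eq_true_eq]
      rw [if_neg (fun h : pvBase z = c => hc h.symm)]

-- the disjointness test computes "some alternate occurs in ziplist"
theorem pvDisjoint_eq (entry zl : List String) :
    (¬ (PySem.Set.isdisjoint (PySem.Set.ofList zl) entry = true)) ↔
      entry.any (fun a => decide (a ∈ zl)) = true := by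
  rw [PySem.Set.isdisjoint_iff]
  simp only [List.any_eq_true, decide_eq_true_eq, not_forall]
  constructor
  · rintro ⟨x, hx, hmem⟩
    exact ⟨x, not_not.mp hmem, (PySem.Set.mem_ofList zl x).mp hx⟩
  · rintro ⟨a, ha, haz⟩
    exact ⟨a, (PySem.Set.mem_ofList zl a).mpr haz, not_not.mpr ha⟩

-- ===== VERDICT =====
theorem find_in_ziplist_spec : Claim_equal_find_in_ziplist := by
  intro entry ziplist _
  unfold Spec_find_in_ziplist find_in_ziplist find_in_ziplist_alt
  rw [pvLoopA_char]
  by_cases h : entry.any (fun a => decide (a ∈ ziplist)) = true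
  · rw [if_pos h, if_pos ((pvDisjoint_eq entry ziplist).mpr h)]
  · rw [if_neg h, if_neg (fun hc => h ((pvDisjoint_eq entry ziplist).mp hc))]
    simp only [List.nil_append]
    refine congrArg (fun l => (false, some l)) ?_
    refine (List.flatMap_congr ?_).symm
    intro a _
    rw [pvDict_getD, PySem.Dict.getD_empty, List.nil_append]
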